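-- pv_equiv track=rewrite | github.com/harrydowning/serl | src/tool/utils.py | get_tokens_in_grammar
-- ===== SOURCE A (Python) =====
-- def get_tokens_in_grammar(token_map: dict[str, str],
--                           norm_grammar: dict[str, list[str]]) -> list[str]:
--     tokens = sorted(token_map.values(), key=len, reverse=True)
--     rules = [rule for rules in norm_grammar.values() for rule in rules]
--     used = set()
--     for rule in rules:
--         for token in tokens:
--             if token in rule:
--                 rule.replace(token, '')
--                 used.add(token)
--     return [token for token, token_name in token_map.items()
--             if token_name in used]
-- ===== SOURCE B (Python) =====
-- def get_tokens_in_grammar(token_map: dict[str, str],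
--                           norm_grammar: dict[str, list[str]]) -> list[str]:
--     rules = [rule for rules in norm_grammar.values() for rule in rules]
--     return [name for name, token in token_map.items()
--             if any(token in rule for rule in rules)]
-- ===== Notes on version B (the rewrite author's own statement) =====
-- stated objective: simpler
-- what changed: Drops A's length-descending sort, the dead rule.replace call and the intermediate 'used' set: B filters token_map directly, keeping a key when its token value occurs as a substring of any rule, with any() stopping at the first matching rule.
import Mathlib
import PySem

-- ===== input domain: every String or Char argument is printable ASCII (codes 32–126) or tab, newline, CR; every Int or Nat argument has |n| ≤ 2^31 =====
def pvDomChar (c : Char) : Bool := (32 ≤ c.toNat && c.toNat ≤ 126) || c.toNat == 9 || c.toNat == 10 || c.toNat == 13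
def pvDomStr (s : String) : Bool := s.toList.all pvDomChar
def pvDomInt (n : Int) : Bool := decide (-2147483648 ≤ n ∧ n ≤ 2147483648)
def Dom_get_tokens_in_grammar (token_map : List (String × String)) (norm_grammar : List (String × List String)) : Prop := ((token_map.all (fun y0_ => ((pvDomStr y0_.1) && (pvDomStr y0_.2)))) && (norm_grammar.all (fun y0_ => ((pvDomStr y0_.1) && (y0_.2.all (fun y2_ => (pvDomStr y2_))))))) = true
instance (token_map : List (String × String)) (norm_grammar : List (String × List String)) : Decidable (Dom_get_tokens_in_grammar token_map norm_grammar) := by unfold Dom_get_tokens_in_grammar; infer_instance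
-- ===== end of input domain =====

-- B drops A's dead sort/replace and intermediate set, filtering token_map directly (simpler); return-value equivalence.
-- ===== PORT A =====
def get_tokens_in_grammar (token_map : List (String × String)) (norm_grammar : List (String × List String)) : List String :=
  let tokens := PySem.List.sorted (token_map.map (fun p => p.2)) (fun t => (PySem.Str.len t : Int)) true
  let rules := norm_grammar.flatMap (fun p => p.2)
  let used : PySem.Set String := rules.foldl (fun used rule =>
    tokens.foldl (fun used token =>
      if PySem.Str.isIn token rule then PySem.Set.add used token else used) used) PySem.Set.empty
  (token_map.filter (fun p => PySem.Set.contains used p.2)).map (fun p => p.1)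

-- ===== PORT B =====
def get_tokens_in_grammar_alt (token_map : List (String × String)) (norm_grammar : List (String × List String)) : List String :=
  let rules := norm_grammar.flatMap (fun p => p.2)
  (token_map.filter (fun p => rules.any (fun rule => PySem.Str.isIn p.2 rule))).map (fun p => p.1)

-- ===== PRECONDITION & SPEC =====
def Spec_get_tokens_in_grammar (token_map : List (String × String)) (norm_grammar : List (String × List String)) (out : List String) : Prop := out = get_tokens_in_grammar_alt token_map norm_grammar
instance (token_map : List (String × String)) (norm_grammar : List (String × List String)) (out : List String) : Decidable (Spec_get_tokens_in_grammar token_map norm_grammar out) := by unfold Spec_get_tokens_in_grammar; infer_instance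

-- ===== CLAIM (what is proved, stated in full; the proofs are below) =====
def Claim_equal_get_tokens_in_grammar : Prop := ∀ (token_map : List (String × String)) (norm_grammar : List (String × List String)), Dom_get_tokens_in_grammar token_map norm_grammar → Spec_get_tokens_in_grammar token_map norm_grammar (get_tokens_in_grammar token_map norm_grammar)

-- ===== LEMMAS AND PROOFS =====

-- inner loop over tokens: x ends up in the set iff it was there or x is a token occurring in rule
theorem pv_mem_inner (tokens : List String) (rule : String) (s : PySem.Set String) (x : String) :
    x ∈ tokens.foldl (fun used token =>
        if PySem.Str.isIn token rule then PySem.Set.add used token else used) s ↔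
      x ∈ s ∨ (x ∈ tokens ∧ PySem.Str.isIn x rule = true) := by
  induction tokens generalizing s with
  | nil => simp
  | cons t ts ih =>
    simp only [List.foldl_cons]
    by_cases h : PySem.Str.isIn t rule = true
    · rw [if_pos h, ih]
      simp only [PySem.Set.mem_add, List.mem_cons]
      constructor
      · rintro (⟨hs | rfl⟩ | ⟨hm, hr⟩)
        · exact Or.inl hs
        · exact Or.inr ⟨Or.inl rfl, h⟩
        · exact Or.inr ⟨Or.inr hm, hr⟩
      · rintro (hs | ⟨(rfl | hm), hr⟩)
        · exact Or.inl (Or.inl hs)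
        · exact Or.inl (Or.inr rfl)
        · exact Or.inr ⟨hm, hr⟩
    · rw [if_neg h, ih]
      simp only [List.mem_cons]
      constructor
      · rintro (hs | ⟨hm, hr⟩)
        · exact Or.inl hs
        · exact Or.inr ⟨Or.inr hm, hr⟩
      · rintro (hs | ⟨(rfl | hm), hr⟩)
        · exact Or.inl hs
        · exact absurd hr h
        · exact Or.inr ⟨hm, hr⟩

-- outer loop over rules
theorem pv_mem_outer (tokens : List String) (rules : List String) (s : PySem.Set String) (x : String) :
    x ∈ rules.foldl (fun used rule =>
        tokens.foldl (fun used token =>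
          if PySem.Str.isIn token rule then PySem.Set.add used token else used) used) s ↔
      x ∈ s ∨ (x ∈ tokens ∧ ∃ r ∈ rules, PySem.Str.isIn x r = true) := by
  induction rules generalizing s with
  | nil => simp
  | cons r rs ih =>
    simp only [List.foldl_cons, ih, pv_mem_inner]
    constructor
    · rintro ((hs | ⟨hm, hr⟩) | ⟨hm, rr, hrr, hir⟩)
      · exact Or.inl hs
      · exact Or.inr ⟨hm, r, by simp, hr⟩
      · exact Or.inr ⟨hm, rr, by simp [hrr], hir⟩
    · rintro (hs | ⟨hm, rr, hrr, hir⟩)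
      · exact Or.inl (Or.inl hs)
      · rcases List.mem_cons.mp hrr with rfl | hrs
        · exact Or.inl (Or.inr ⟨hm, hir⟩)
        · exact Or.inr ⟨hm, rr, hrs, hir⟩

-- ===== VERDICT (by name: the statement is the Claim_ definition above) =====
theorem get_tokens_in_grammar_spec : Claim_equal_get_tokens_in_grammar := by
  intro token_map norm_grammar _
  unfold Spec_get_tokens_in_grammar get_tokens_in_grammar get_tokens_in_grammar_alt
  dsimp only
  congr 1
  apply List.filter_congr
  intro p hp
  rw [Bool.eq_iff_iff, PySem.Set.contains_iff, pv_mem_outer]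
  simp only [PySem.Set.empty, List.not_mem_nil, false_or, List.any_eq_true]
  have hv : p.2 ∈ PySem.List.sorted (token_map.map (fun p => p.2)) (fun t => (PySem.Str.len t : Int)) true := by
    rw [PySem.List.mem_sorted]
    exact List.mem_map.mpr ⟨p, hp, rfl⟩
  constructor
  · rintro ⟨_, r, hr, hir⟩; exact ⟨r, hr, hir⟩
  · rintro ⟨r, hr, hir⟩; exact ⟨hv, r, hr, hir⟩
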